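-- pv_equiv track=rewrite | github.com/YixingMa-1/CSprojectsTrois | Algorithm&DataStructure/CS313E-ElementsOfSoftwareDesign/Boxes.py | largest_nesting_subsets
-- ===== SOURCE A (Python) =====
-- def largest_nesting_subsets (all_box_subsets):
--   largest_subsets = []
--   largest_size = 0
--   for i in range(len(all_box_subsets)):
--     boo = True
--     for j in range(len(all_box_subsets[i]) - 1):
--         if does_fit(all_box_subsets[i][j], all_box_subsets[i][j + 1]) is False:
--           boo = False
--           break
--     if boo is True:
--       if largest_size < len(all_box_subsets[i]):
--         largest_size = len(all_box_subsets[i])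
--         largest_subsets.clear()
--         largest_subsets.append(all_box_subsets[i])
--       elif largest_size == len(all_box_subsets[i]):
--         largest_subsets.append(all_box_subsets[i])
--   return largest_subsets
--
-- def does_fit (box1, box2):
--   return (box1[0] < box2[0] and box1[1] < box2[1] and box1[2] < box2[2])
-- ===== SOURCE B (Python) =====
-- def does_fit(box1, box2):
--   return (box1[0] < box2[0] and box1[1] < box2[1] and box1[2] < box2[2])
--
-- def largest_nesting_subsets(all_box_subsets):
--   valid = [s for s in all_box_subsets
--            if all(does_fit(a, b) for a, b in zip(s, s[1:]))]
--   best = max((len(s) for s in valid), default=0)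
--   return [s for s in valid if len(s) == best]
-- ===== Notes on version B (the rewrite author's own statement) =====
-- stated objective: simpler
-- what changed: Replaces A's single-pass running-max state machine (with clear/append on the accumulator) by a build-filter-then-select pipeline: filter valid chains via zip of adjacent pairs, take the max length with default 0, then filter by that length.
import Mathlib
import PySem

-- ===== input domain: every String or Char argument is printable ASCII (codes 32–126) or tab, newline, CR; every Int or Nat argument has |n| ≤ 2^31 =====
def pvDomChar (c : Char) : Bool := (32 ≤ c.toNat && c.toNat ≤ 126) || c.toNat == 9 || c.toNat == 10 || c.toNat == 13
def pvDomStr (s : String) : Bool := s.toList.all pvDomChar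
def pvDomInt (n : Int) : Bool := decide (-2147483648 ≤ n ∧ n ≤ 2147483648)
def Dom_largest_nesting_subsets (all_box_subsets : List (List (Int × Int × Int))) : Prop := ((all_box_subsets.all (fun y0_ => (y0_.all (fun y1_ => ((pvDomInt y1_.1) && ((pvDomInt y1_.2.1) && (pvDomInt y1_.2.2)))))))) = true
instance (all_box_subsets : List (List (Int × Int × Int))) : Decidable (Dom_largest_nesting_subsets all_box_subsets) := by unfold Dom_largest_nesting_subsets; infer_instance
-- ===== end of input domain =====

-- ===== PORT A =====
-- B is a simpler build-filter-then-select pipeline replacing A's running-max state machine; same values.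
def does_fit (box1 box2 : Int × Int × Int) : Bool :=
  box1.1 < box2.1 && box1.2.1 < box2.2.1 && box1.2.2 < box2.2.2

-- inner j-loop with break: walks adjacent pairs, stops at the first failure
def chainA : List (Int × Int × Int) → Bool
  | a :: b :: rest => if does_fit a b = false then false else chainA (b :: rest)
  | _ => true

def stepA (acc : List (List (Int × Int × Int)) × Nat) (x : List (Int × Int × Int)) :
    List (List (Int × Int × Int)) × Nat :=
  if chainA x then
    if acc.2 < x.length then ([x], x.length)
    else if acc.2 = x.length then (acc.1 ++ [x], acc.2)
    else acc
  else acc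

def largest_nesting_subsets (all_box_subsets : List (List (Int × Int × Int))) : List (List (Int × Int × Int)) :=
  (all_box_subsets.foldl stepA ([], 0)).1

-- ===== PORT B =====
-- all(does_fit(a,b) for a,b in zip(s, s[1:]))
def chainB (s : List (Int × Int × Int)) : Bool :=
  (s.zip s.tail).all (fun p => does_fit p.1 p.2)

def largest_nesting_subsets_alt (all_box_subsets : List (List (Int × Int × Int))) : List (List (Int × Int × Int)) :=
  let valid := all_box_subsets.filter chainB
  let best := (valid.map List.length).foldl Nat.max 0
  valid.filter (fun s => s.length = best)

-- ===== PRECONDITION & SPEC =====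
def Spec_largest_nesting_subsets (all_box_subsets : List (List (Int × Int × Int))) (out : List (List (Int × Int × Int))) : Prop := out = largest_nesting_subsets_alt all_box_subsets
instance (all_box_subsets : List (List (Int × Int × Int))) (out : List (List (Int × Int × Int))) : Decidable (Spec_largest_nesting_subsets all_box_subsets out) := by unfold Spec_largest_nesting_subsets; infer_instance

-- ===== CLAIM =====
def Claim_equal_largest_nesting_subsets : Prop := ∀ (all_box_subsets : List (List (Int × Int × Int))), Dom_largest_nesting_subsets all_box_subsets → Spec_largest_nesting_subsets all_box_subsets (largest_nesting_subsets all_box_subsets)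

-- ===== LEMMAS AND PROOFS =====
theorem chainA_eq_chainB (s : List (Int × Int × Int)) : chainA s = chainB s := by
  induction s with
  | nil => rfl
  | cons a t ih =>
    cases t with
    | nil => rfl
    | cons b r =>
      simp only [chainA, chainB, List.tail_cons, List.zip_cons_cons, List.all_cons] at *
      by_cases h : does_fit a b = false
      · simp [h]
      · simp only [h]
        rw [ih]
        have hb : does_fit a b = true := by revert h; cases does_fit a b <;> simp
        simp

theorem b_le_foldl_max (l : List Nat) (b : Nat) : b ≤ l.foldl Nat.max b := by
  induction l generalizing b with
  | nil => simp
  | cons x t ih => exact le_trans (Nat.le_max_left _ _) (ih _)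

theorem le_foldl_max (l : List Nat) (b a : Nat) (h : a ∈ l) : a ≤ l.foldl Nat.max b := by
  induction l generalizing b with
  | nil => cases h
  | cons x t ih =>
    simp only [List.foldl_cons]
    rcases List.mem_cons.mp h with rfl | h
    · exact le_trans (Nat.le_max_right b a) (b_le_foldl_max t _)
    · exact ih _ h

def bestOf (xs : List (List (Int × Int × Int))) : Nat :=
  ((xs.filter chainB).map List.length).foldl Nat.max 0

theorem invariant (xs : List (List (Int × Int × Int))) :
    xs.foldl stepA ([], 0) =
      ((xs.filter chainB).filter (fun s => s.length = bestOf xs), bestOf xs) := by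
  induction xs using List.reverseRecOn with
  | nil => rfl
  | append_singleton ys x ih =>
    rw [List.foldl_append, List.foldl_cons, List.foldl_nil, ih]
    by_cases hv : chainB x
    · have hva : chainA x = true := by rw [chainA_eq_chainB]; exact hv
      have hfilter : (ys ++ [x]).filter chainB = ys.filter chainB ++ [x] := by
        simp [List.filter_append, hv]
      have hbest : bestOf (ys ++ [x]) = Nat.max (bestOf ys) x.length := by
        unfold bestOf
        rw [hfilter, List.map_append, List.foldl_append]
        simp [Nat.max_comm]
      have hbound : ∀ s ∈ ys.filter chainB, s.length ≤ bestOf ys := by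
        intro s hs
        exact le_foldl_max _ _ _ (List.mem_map_of_mem hs)
      unfold stepA
      simp only [hva, if_true]
      by_cases hlt : bestOf ys < x.length
      · simp only [hlt, if_true]
        have hm : Nat.max (bestOf ys) x.length = x.length := Nat.max_eq_right (Nat.le_of_lt hlt)
        rw [hbest, hm, hfilter, List.filter_append]
        have : (ys.filter chainB).filter (fun s => s.length = x.length) = [] := by
          rw [List.filter_eq_nil_iff]
          intro s hs
          have := hbound s hs
          simp only [decide_eq_true_eq]
          omega
        simp [this]
      · simp only [hlt, if_false]
        by_cases heq : bestOf ys = x.length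
        · simp only [heq, if_pos]
          have hm : Nat.max (bestOf ys) x.length = bestOf ys := Nat.max_eq_left (Nat.le_of_not_lt hlt)
          rw [hbest, hm, hfilter, List.filter_append]
          simp [heq]
        · simp only [if_neg heq]
          have hgt : x.length < bestOf ys := by omega
          have hm : Nat.max (bestOf ys) x.length = bestOf ys := Nat.max_eq_left (Nat.le_of_lt hgt)
          rw [hbest, hm, hfilter, List.filter_append]
          have : List.filter (fun s => decide (s.length = bestOf ys)) [x] = [] := by
            simp; omega
          simp only [this, List.append_nil]
    · have hva : chainA x = false := by rw [chainA_eq_chainB]; simpa using hv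
      have hfilter : (ys ++ [x]).filter chainB = ys.filter chainB := by
        simp [List.filter_append, hv]
      have hbest : bestOf (ys ++ [x]) = bestOf ys := by unfold bestOf; rw [hfilter]
      unfold stepA
      simp [hva, hfilter, hbest]

-- ===== VERDICT =====
theorem largest_nesting_subsets_spec : Claim_equal_largest_nesting_subsets := by
  intro xs _
  unfold Spec_largest_nesting_subsets largest_nesting_subsets largest_nesting_subsets_alt
  rw [invariant]
  rfl
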